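-- pv_equiv track=rewrite | github.com/J-Jaeh/algorithm | 프로그래머스/lv0/120846. 합성수 찾기/합성수 찾기.py | solution
-- ===== SOURCE A (Python) =====
-- def solution(n):
--     #합성수 구하기
--
--     count = 0
--     answer =0
--     for a in range(1,n+1):
--         for b in range(1,a+1):
--             if a%b==0:
--                 count +=1
--         if count >=3:
--             answer+=1
--             count=0
--
--     if answer !=0:
--         return answer-1
--     else:
--         return 0
-- ===== SOURCE B (Python) =====
-- def solution(n):
--     # Count the composite numbers in [4, n] by trial division up to sqrt(a).
--     total = 0
--     for a in range(4, n + 1):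
--         d = 2
--         while d * d <= a:
--             if a % d == 0:
--                 total += 1
--                 break
--             d += 1
--     return total
-- ===== Notes on version B (the rewrite author's own statement) =====
-- stated objective: faster
-- what changed: Replaced the stateful O(n^2) loop (summing full divisor counts of every a and resetting on >=3) by a direct count of composites in [4,n] via trial division up to sqrt(a), after proving A's accumulator/reset dance computes exactly that count.
import Mathlib
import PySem

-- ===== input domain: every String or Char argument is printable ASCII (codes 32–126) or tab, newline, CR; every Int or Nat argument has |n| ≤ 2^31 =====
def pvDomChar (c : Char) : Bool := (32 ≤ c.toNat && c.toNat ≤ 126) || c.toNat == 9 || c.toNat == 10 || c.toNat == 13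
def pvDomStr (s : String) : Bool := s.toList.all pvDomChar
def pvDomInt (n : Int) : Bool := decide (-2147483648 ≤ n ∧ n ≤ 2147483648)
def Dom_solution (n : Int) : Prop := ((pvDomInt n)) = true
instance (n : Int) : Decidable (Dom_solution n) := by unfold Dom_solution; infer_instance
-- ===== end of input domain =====

-- B counts the composites in [4, n] directly by trial division up to √a; A's
-- accumulate-divisor-counts-then-reset loop is proved below to compute that same count.

-- ===== PORT A =====
-- the body of A's outer `for a` loop, carrying the state (count, answer)
def solnStep (s : Int × Int) (a : Int) : Int × Int :=
  let count := (PySem.List.pyRange 1 (a + 1) 1).foldl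
    (fun c b => if PySem.Int.mod a b = 0 then c + 1 else c) s.1
  if 3 ≤ count then (0, s.2 + 1) else (count, s.2)

def solution (n : Int) : Int :=
  let s := (PySem.List.pyRange 1 (n + 1) 1).foldl solnStep (0, 0)
  if s.2 ≠ 0 then s.2 - 1 else 0

-- ===== PORT B =====
-- B's inner `while d * d <= a` trial-division loop with its break:
-- true iff some e ≥ d with e * e ≤ a divides a
def trialDiv (a d : Int) : Bool :=
  if d * d ≤ a then
    (if PySem.Int.mod a d = 0 then true else trialDiv a (d + 1))
  else false
termination_by (a + 1 - d).toNat
decreasing_by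
  have hd : d ≤ a := by nlinarith [mul_self_nonneg d, mul_self_nonneg (d - 1)]
  omega

def solution_alt (n : Int) : Int :=
  (PySem.List.pyRange 4 (n + 1) 1).foldl
    (fun total a => if trialDiv a 2 then total + 1 else total) 0

-- ===== PRECONDITION & SPEC =====
def Spec_solution (n : Int) (out : Int) : Prop := out = solution_alt n
instance (n : Int) (out : Int) : Decidable (Spec_solution n out) := by unfold Spec_solution; infer_instance

-- ===== CLAIM (what is proved, stated in full; the proofs are below) =====
def Claim_equal_solution : Prop := ∀ (n : Int), Dom_solution n → Spec_solution n (solution n)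

-- ===== LEMMAS AND PROOFS =====

-- a has a proper divisor ≥ 2, i.e. a is composite
def Comp (a : Int) : Prop := ∃ d : Int, 2 ≤ d ∧ d < a ∧ d ∣ a

-- number of divisors of m in [1, m]: the value A's inner loop adds to `count`
def divCount (m : Int) : Int :=
  ((PySem.List.pyRange 1 (m + 1) 1).countP (fun b => decide (PySem.Int.mod m b = 0)) : Nat)

-- the leftover `count` in A's state after processing a = 1 .. m (for m ≥ 2)
def cAux (m : Int) : Int := if 3 ≤ m ∧ trialDiv m 2 = false then divCount m else 0

theorem trialDiv_true_iff (a d : Int) (hd : 1 ≤ d) :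
    trialDiv a d = true ↔ ∃ e : Int, d ≤ e ∧ e * e ≤ a ∧ e ∣ a := by
  revert hd
  fun_induction trialDiv a d with
  | case1 d hg hm =>
    intro hd
    constructor
    · intro _
      exact ⟨d, le_refl d, hg, (PySem.Int.mod_eq_zero_iff_dvd a d).mp hm⟩
    · intro _; rfl
  | case2 d hg hm ih =>
    intro hd
    rw [ih (by omega)]
    constructor
    · rintro ⟨e, h1, h2, h3⟩; exact ⟨e, by omega, h2, h3⟩
    · rintro ⟨e, h1, h2, h3⟩
      refine ⟨e, ?_, h2, h3⟩
      rcases (by omega : d + 1 ≤ e ∨ e = d) with h | h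
      · exact h
      · exfalso; apply hm; rw [PySem.Int.mod_eq_zero_iff_dvd]; rw [← h]; exact h3
  | case3 d hg =>
    intro hd
    constructor
    · intro h; exact absurd h (by simp)
    · rintro ⟨e, h1, h2, h3⟩
      exfalso
      apply hg
      nlinarith

theorem trialDiv_iff_comp (a : Int) (ha : 2 ≤ a) : trialDiv a 2 = true ↔ Comp a := by
  rw [trialDiv_true_iff a 2 (by omega)]
  constructor
  · rintro ⟨e, h1, h2, h3⟩
    exact ⟨e, h1, by nlinarith, h3⟩
  · rintro ⟨d, h1, h2, h3⟩
    obtain ⟨k, hk⟩ := h3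
    have hk2 : 2 ≤ k := by nlinarith
    rcases (by omega : d ≤ k ∨ k ≤ d) with h | h
    · exact ⟨d, h1, by nlinarith, ⟨k, hk⟩⟩
    · exact ⟨k, hk2, by nlinarith, ⟨d, by rw [hk]; ring⟩⟩

theorem divCount_ge_three (a : Int) (ha : Comp a) : 3 ≤ divCount a := by
  obtain ⟨d, h1, h2, h3⟩ := ha
  have hsub : List.Subperm [1, d, a] ((PySem.List.pyRange 1 (a + 1) 1).filter
      (fun b => decide (PySem.Int.mod a b = 0))) := by
    apply List.subperm_of_subset
    · simp only [List.nodup_cons, List.mem_cons, List.not_mem_nil, List.nodup_nil,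
        and_true, not_or, or_false]
      exact ⟨⟨by omega, by omega⟩, by omega, not_false⟩
    · intro x hx
      simp only [List.mem_cons, List.not_mem_nil, or_false] at hx
      simp only [List.mem_filter, PySem.List.mem_pyRange_one, decide_eq_true_eq,
        PySem.Int.mod_eq_zero_iff_dvd]
      rcases hx with h | h | h
      · rw [h]; exact ⟨⟨le_refl 1, by omega⟩, one_dvd a⟩
      · rw [h]; exact ⟨⟨by omega, by omega⟩, h3⟩
      · rw [h]; exact ⟨⟨by omega, by omega⟩, dvd_refl a⟩
  have hlen := hsub.length_le
  simp only [List.length_cons, List.length_nil] at hlen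
  rw [divCount, List.countP_eq_length_filter]
  omega

theorem divCount_le_two (a : Int) (hc : ¬ Comp a) : divCount a ≤ 2 := by
  have hsub : List.Subperm ((PySem.List.pyRange 1 (a + 1) 1).filter
      (fun b => decide (PySem.Int.mod a b = 0))) [1, a] := by
    apply List.subperm_of_subset
    · exact (PySem.List.nodup_pyRange_one 1 (a + 1)).filter _
    · intro x hx
      simp only [List.mem_filter, PySem.List.mem_pyRange_one, decide_eq_true_eq,
        PySem.Int.mod_eq_zero_iff_dvd] at hx
      obtain ⟨⟨hx1, hx2⟩, hxd⟩ := hx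
      simp only [List.mem_cons, List.not_mem_nil, or_false]
      by_contra hne
      push Not at hne
      exact hc ⟨x, by omega, by omega, hxd⟩
  have hlen := hsub.length_le
  simp only [List.length_cons, List.length_nil] at hlen
  rw [divCount, List.countP_eq_length_filter]
  omega

theorem no_two_consecutive (m : Int) (hm : 3 ≤ m) (h1 : ¬ Comp m) (h2 : ¬ Comp (m + 1)) : False := by
  rcases Int.even_or_odd m with ⟨k, hk⟩ | ⟨k, hk⟩
  · exact h1 ⟨2, le_refl 2, by omega, ⟨k, by omega⟩⟩
  · exact h2 ⟨2, le_refl 2, by omega, ⟨k + 1, by omega⟩⟩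

theorem divCount_nonneg (m : Int) : 0 ≤ divCount m := by
  simp [divCount]

theorem cAux_nonneg (m : Int) : 0 ≤ cAux m := by
  unfold cAux
  split
  · exact divCount_nonneg m
  · exact le_refl 0

theorem inner_fold_eq (a : Int) (c : Int) :
    (PySem.List.pyRange 1 (a + 1) 1).foldl
      (fun c b => if PySem.Int.mod a b = 0 then c + 1 else c) c = c + divCount a := by
  rw [divCount]
  exact PySem.List.foldl_ite_add_one _ _ _

theorem foldl_alt_le (l : List Int) (t : Int) :
    t ≤ l.foldl (fun total a => if trialDiv a 2 then total + 1 else total) t := by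
  induction l generalizing t with
  | nil => exact le_refl t
  | cons x xs ih =>
    simp only [List.foldl_cons]
    split
    · exact le_trans (by omega) (ih (t + 1))
    · exact ih t

theorem alt_fold_nonneg (n : Int) : 0 ≤ solution_alt n := foldl_alt_le _ 0

theorem comp_ge_four (a : Int) (h : trialDiv a 2 = true) : 4 ≤ a := by
  obtain ⟨e, h1, h2, _⟩ := (trialDiv_true_iff a 2 (by omega)).mp h
  nlinarith

theorem invariant (m : Int) (hm : 2 ≤ m) :
    (PySem.List.pyRange 1 (m + 1) 1).foldl solnStep (0, 0) = (cAux m, 1 + solution_alt m) := by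
  induction m, hm using Int.le_induction with
  | base => decide
  | succ m hm ih =>
    rw [PySem.List.pyRange_one_succ_right (by omega : (1:Int) ≤ m + 1), List.foldl_append, ih]
    simp only [List.foldl_cons, List.foldl_nil]
    show solnStep (cAux m, 1 + solution_alt m) (m + 1) = _
    unfold solnStep
    simp only [inner_fold_eq]
    rcases hb : trialDiv (m + 1) 2 with _ | _
    · -- m + 1 not composite: the accumulator does not reach 3
      have hnc : ¬ Comp (m + 1) := fun h =>
        absurd ((trialDiv_iff_comp (m + 1) (by omega)).mpr h) (by simp [hb])
      have hca : cAux m = 0 := by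
        rcases (by omega : m = 2 ∨ 3 ≤ m) with h2 | h3
        · subst h2; decide
        · rcases hbm : trialDiv m 2 with _ | _
          · exact absurd (no_two_consecutive m h3
              (fun h => absurd ((trialDiv_iff_comp m (by omega)).mpr h) (by simp [hbm]))
              hnc) not_false
          · simp [cAux, hbm]
      have hle : divCount (m + 1) ≤ 2 := divCount_le_two (m + 1) hnc
      rw [hca]
      rw [if_neg (by omega)]
      have hcr : cAux (m + 1) = divCount (m + 1) := by
        unfold cAux
        rw [if_pos ⟨by omega, hb⟩]
      have halt : solution_alt (m + 1) = solution_alt m := by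
        unfold solution_alt
        rcases (by omega : m = 2 ∨ 3 ≤ m) with h2 | h3
        · subst h2
          rw [PySem.List.pyRange_one_eq_nil (by omega), PySem.List.pyRange_one_eq_nil (by omega)]
        · rw [PySem.List.pyRange_one_succ_right (by omega : (4:Int) ≤ m + 1), List.foldl_append]
          simp [hb]
      rw [hcr, halt]
      simp
    · -- m + 1 composite: count ≥ 3, answer increments and count resets
      have hc : Comp (m + 1) := (trialDiv_iff_comp (m + 1) (by omega)).mp hb
      have h3 : 3 ≤ divCount (m + 1) := divCount_ge_three (m + 1) hc
      have h0 : 0 ≤ cAux m := cAux_nonneg m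
      have h4 : (4:Int) ≤ m + 1 := comp_ge_four _ hb
      rw [if_pos (show (3:Int) ≤ cAux m + divCount (m + 1) by omega)]
      have hcr : cAux (m + 1) = 0 := by simp [cAux, hb]
      have halt : solution_alt (m + 1) = solution_alt m + 1 := by
        unfold solution_alt
        rw [PySem.List.pyRange_one_succ_right (by omega : (4:Int) ≤ m + 1), List.foldl_append]
        · simp [hb]
      rw [hcr, halt]
      simp [add_assoc]

-- ===== VERDICT (by name: the statement is the Claim_ definition above) =====
theorem solution_spec : Claim_equal_solution := by
  intro n _
  unfold Spec_solution
  rcases (by omega : 2 ≤ n ∨ n < 2) with hn | hn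
  · have hinv := invariant n hn
    have hge := alt_fold_nonneg n
    simp only [solution, hinv]
    have : (1 : Int) + solution_alt n ≠ 0 := by omega
    simp [this]
  · rcases (by omega : n ≤ 0 ∨ n = 1) with h0 | h0
    · have h1 : PySem.List.pyRange 1 (n + 1) 1 = [] := PySem.List.pyRange_one_eq_nil (by omega)
      have h2 : PySem.List.pyRange 4 (n + 1) 1 = [] := PySem.List.pyRange_one_eq_nil (by omega)
      simp [solution, solution_alt, h1, h2]
    · subst h0
      decide
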